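-- pv_equiv track=rewrite | github.com/pruemmer/chc-comp-2026 | majority-vote-relabel.py | compute_verdict_counts
-- ===== SOURCE A (Python) =====
-- def majority_vote(solver_verdicts):
--     """Given {solver: verdict}, compute majority vote.
--     Returns (verdict, supporters, opposers) or (None, [], []) if no data.
--     verdict is "true", "false", or "inconsistent".
--     """
--     if not solver_verdicts:
--         return None, [], []
--
--     true_solvers = [s for s, v in solver_verdicts.items() if v == "true"]
--     false_solvers = [s for s, v in solver_verdicts.items() if v == "false"]
--
--     n_true = len(true_solvers)
--     n_false = len(false_solvers)
--
--     if n_true > 0 and n_false > 0: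
--         # Disagreement: majority wins, but mark as inconsistent if tied
--         if n_true > n_false:
--             return "true", true_solvers, false_solvers
--         elif n_false > n_true:
--             return "false", false_solvers, true_solvers
--         else:
--             return "inconsistent", true_solvers, false_solvers
--     elif n_true > 0:
--         return "true", true_solvers, []
--     elif n_false > 0:
--         return "false", false_solvers, []
--     else:
--         return None, [], []
--
-- def compute_verdict_counts(all_verdicts, bench_to_cat, categories):
--     """Compute verdict distribution per category from raw solver votes."""
--     counts = {c: {"true": 0, "false": 0, "inconsistent": 0, "unknown": 0} for c in categories}
--     for bench, cat in bench_to_cat.items():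
--         verdict, _, _ = majority_vote(all_verdicts.get(bench, {}))
--         if verdict == "true":
--             counts[cat]["true"] += 1
--         elif verdict == "false":
--             counts[cat]["false"] += 1
--         elif verdict == "inconsistent":
--             counts[cat]["inconsistent"] += 1
--         else:
--             counts[cat]["unknown"] += 1
--     return counts
-- ===== SOURCE B (Python) =====
-- def compute_verdict_counts(all_verdicts, bench_to_cat, categories):
--     """Compute verdict distribution per category from raw solver votes."""
--     # Pass 1: classify each benchmark by a signed vote sum (+1 true, -1 false)
--     # and tally (category, verdict) pairs in a flat counter.
--     pair_counts = {}
--     for bench, cat in bench_to_cat.items():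
--         s = 0
--         m = 0
--         for v in all_verdicts.get(bench, {}).values():
--             if v == "true":
--                 s += 1
--                 m += 1
--             elif v == "false":
--                 s -= 1
--                 m += 1
--         if m == 0:
--             verdict = "unknown"
--         elif s > 0:
--             verdict = "true"
--         elif s < 0:
--             verdict = "false"
--         else:
--             verdict = "inconsistent"
--         key = (cat, verdict)
--         pair_counts[key] = pair_counts.get(key, 0) + 1
--     # Pass 2: write the flat tallies into the per-category table.
--     counts = {c: {"true": 0, "false": 0, "inconsistent": 0, "unknown": 0} for c in categories}
--     for (cat, verdict), n in pair_counts.items():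
--         counts[cat][verdict] += n
--     return counts
-- ===== Notes on version B (the rewrite author's own statement) =====
-- stated objective: alternative
-- what changed: Replaced the per-benchmark filtered-list majority_vote plus in-loop nested dict increments by a two-stage pipeline: each benchmark is classified via a single signed vote sum (+1 for 'true', -1 for 'false') instead of two solver lists, the results are tallied in one flat (category, verdict) pair counter, and the tallies are written into the per-category table in a final pass.
import Mathlib
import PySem

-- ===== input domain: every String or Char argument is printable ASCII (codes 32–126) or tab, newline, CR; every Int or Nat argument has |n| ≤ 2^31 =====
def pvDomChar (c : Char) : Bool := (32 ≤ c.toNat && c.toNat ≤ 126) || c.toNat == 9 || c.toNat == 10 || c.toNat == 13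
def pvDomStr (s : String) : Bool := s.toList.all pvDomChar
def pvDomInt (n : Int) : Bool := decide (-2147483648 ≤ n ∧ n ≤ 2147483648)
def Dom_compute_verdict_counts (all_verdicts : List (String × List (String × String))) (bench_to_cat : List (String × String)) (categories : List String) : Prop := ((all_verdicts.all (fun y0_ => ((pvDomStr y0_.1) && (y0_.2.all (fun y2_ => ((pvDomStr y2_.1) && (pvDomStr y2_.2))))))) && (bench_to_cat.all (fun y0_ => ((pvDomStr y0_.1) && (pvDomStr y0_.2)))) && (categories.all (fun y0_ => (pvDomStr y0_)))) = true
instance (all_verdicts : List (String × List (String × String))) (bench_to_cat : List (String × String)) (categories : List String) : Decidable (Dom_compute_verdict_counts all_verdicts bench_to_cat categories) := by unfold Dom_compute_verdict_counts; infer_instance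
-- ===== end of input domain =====

-- B replaces the filtered-list majority_vote helper and the in-loop nested dict
-- increments by a signed-vote-sum classification, a flat (category, verdict)
-- pair counter, and a final pass materialising the table (alternative decomposition).

-- ===== PORT A =====
-- helper majority_vote, transliterated (solver_verdicts arrives as its items list)
def majority_vote (solver_verdicts : List (String × String)) :
    Option String × List String × List String :=
  if solver_verdicts.isEmpty then (none, [], [])
  else
    let true_solvers := (solver_verdicts.filter (fun q => q.2 == "true")).map (·.1)
    let false_solvers := (solver_verdicts.filter (fun q => q.2 == "false")).map (·.1)
    let n_true := true_solvers.length
    let n_false := false_solvers.length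
    if n_true > 0 && n_false > 0 then
      if n_true > n_false then (some "true", true_solvers, false_solvers)
      else if n_false > n_true then (some "false", false_solvers, true_solvers)
      else (some "inconsistent", true_solvers, false_solvers)
    else if n_true > 0 then (some "true", true_solvers, [])
    else if n_false > 0 then (some "false", false_solvers, [])
    else (none, [], [])

-- the initial {c: {...0...} for c in categories}
def pvInitCounts (categories : List String) : PySem.Dict String (PySem.Dict String Int) :=
  categories.foldl
    (fun d c => d.insert c (PySem.Dict.ofList
      [("true", 0), ("false", 0), ("inconsistent", 0), ("unknown", 0)]))
    PySem.Dict.empty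

-- A's loop body: counts[cat][k] += 1.  Under Pre_ the category and the verdict key are
-- always present, so Dict.modify (with a default) is exact there (no KeyError inside Pre_).
def pvBodyA (all_verdicts : List (String × List (String × String)))
    (counts : PySem.Dict String (PySem.Dict String Int)) (p : String × String) :
    PySem.Dict String (PySem.Dict String Int) :=
  let verdict := (majority_vote ((PySem.Dict.mk all_verdicts).getD p.1 [])).1
  if verdict == some "true" then
    counts.modify p.2 PySem.Dict.empty (fun m => m.modify "true" 0 (· + 1))
  else if verdict == some "false" then
    counts.modify p.2 PySem.Dict.empty (fun m => m.modify "false" 0 (· + 1))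
  else if verdict == some "inconsistent" then
    counts.modify p.2 PySem.Dict.empty (fun m => m.modify "inconsistent" 0 (· + 1))
  else
    counts.modify p.2 PySem.Dict.empty (fun m => m.modify "unknown" 0 (· + 1))

def compute_verdict_counts (all_verdicts : List (String × List (String × String))) (bench_to_cat : List (String × String)) (categories : List String) : List (String × List (String × Int)) :=
  ((bench_to_cat.foldl (pvBodyA all_verdicts) (pvInitCounts categories)).items.map
    (fun q => (q.1, q.2.items)))

-- ===== PORT B =====
-- B's per-benchmark classification: one signed vote sum s (+1/-1) and a vote tally m.
def pvBenchVerdict (all_verdicts : List (String × List (String × String)))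
    (bench : String) : String :=
  let sm := (((PySem.Dict.mk all_verdicts).getD bench []).map (·.2)).foldl
      (fun (sm : Int × Int) v =>
        if v == "true" then (sm.1 + 1, sm.2 + 1)
        else if v == "false" then (sm.1 - 1, sm.2 + 1)
        else sm) ((0 : Int), (0 : Int))
  if sm.2 == 0 then "unknown"
  else if sm.1 > 0 then "true"
  else if sm.1 < 0 then "false"
  else "inconsistent"

-- pair_counts: the flat (category, verdict) counter
def pvPairCounts (all_verdicts : List (String × List (String × String)))
    (bench_to_cat : List (String × String)) : PySem.Dict (String × String) Int :=
  bench_to_cat.foldl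
    (fun d p => d.insert (p.2, pvBenchVerdict all_verdicts p.1)
        (d.getD (p.2, pvBenchVerdict all_verdicts p.1) 0 + 1))
    PySem.Dict.empty

-- Pass 2's loop body: counts[cat][verdict] += n (keys present under Pre_, as in A)
def pvBodyB (counts : PySem.Dict String (PySem.Dict String Int))
    (q : (String × String) × Int) : PySem.Dict String (PySem.Dict String Int) :=
  counts.modify q.1.1 PySem.Dict.empty (fun m => m.modify q.1.2 0 (· + q.2))

def compute_verdict_counts_alt (all_verdicts : List (String × List (String × String))) (bench_to_cat : List (String × String)) (categories : List String) : List (String × List (String × Int)) :=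
  (((pvPairCounts all_verdicts bench_to_cat).items.foldl pvBodyB
      (pvInitCounts categories)).items.map (fun q => (q.1, q.2.items)))

-- ===== PRECONDITION & SPEC =====
-- Pre_ excludes exactly the inputs where A raises KeyError: a category value of
-- bench_to_cat that is not in categories.
def Pre_compute_verdict_counts (all_verdicts : List (String × List (String × String))) (bench_to_cat : List (String × String)) (categories : List String) : Prop :=
  ∀ p ∈ bench_to_cat, p.2 ∈ categories
instance (all_verdicts : List (String × List (String × String))) (bench_to_cat : List (String × String)) (categories : List String) : Decidable (Pre_compute_verdict_counts all_verdicts bench_to_cat categories) := by unfold Pre_compute_verdict_counts; infer_instance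
def pvWitness_compute_verdict_counts : (List (String × List (String × String))) × (List (String × String)) × List String :=
  ([("b1", [("s1", "true"), ("s2", "false")])], [("b1", "c1"), ("b2", "c1")], ["c1", "c2"])

def Spec_compute_verdict_counts (all_verdicts : List (String × List (String × String))) (bench_to_cat : List (String × String)) (categories : List String) (out : List (String × List (String × Int))) : Prop := out = compute_verdict_counts_alt all_verdicts bench_to_cat categories
instance (all_verdicts : List (String × List (String × String))) (bench_to_cat : List (String × String)) (categories : List String) (out : List (String × List (String × Int))) : Decidable (Spec_compute_verdict_counts all_verdicts bench_to_cat categories out) := by unfold Spec_compute_verdict_counts; infer_instance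

-- ===== CLAIM (what is proved, stated in full; the proofs are below) =====
def Claim_equal_compute_verdict_counts : Prop := ∀ (all_verdicts : List (String × List (String × String))) (bench_to_cat : List (String × String)) (categories : List String), Dom_compute_verdict_counts all_verdicts bench_to_cat categories → Pre_compute_verdict_counts all_verdicts bench_to_cat categories → Spec_compute_verdict_counts all_verdicts bench_to_cat categories (compute_verdict_counts all_verdicts bench_to_cat categories)
-- ===== LEMMAS AND PROOFS =====

def pvVerdKeys : List String := ["true", "false", "inconsistent", "unknown"]

-- A's verdict key, as the branch A's loop takes on (majority_vote sv).1
def pvKeyA (sv : List (String × String)) : String :=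
  if (majority_vote sv).1 == some "true" then "true"
  else if (majority_vote sv).1 == some "false" then "false"
  else if (majority_vote sv).1 == some "inconsistent" then "inconsistent"
  else "unknown"

lemma pv_count_eq (sv : List (String × String)) (s : String) :
    (sv.map (·.2)).count s = (sv.filter (fun q => q.2 == s)).length := by
  induction sv with
  | nil => rfl
  | cons a l ih =>
    simp only [List.map_cons, List.count_cons, List.filter_cons, ih]
    by_cases h : a.2 = s <;> simp [h]

lemma mv_fst (sv : List (String × String)) :
    (majority_vote sv).1 =
      (let nt := (sv.filter (fun q => q.2 == "true")).length
       let nf := (sv.filter (fun q => q.2 == "false")).length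
       if nt == nf then (if nt == 0 then none else some "inconsistent")
       else if nt > nf then some "true" else some "false") := by
  unfold majority_vote
  by_cases he : sv.isEmpty
  · have : sv = [] := List.isEmpty_iff.mp he
    subst this
    simp
  · simp only [he, Bool.false_eq_true, if_false, List.length_map]
    set nt := (sv.filter (fun q => q.2 == "true")).length with hnt
    set nf := (sv.filter (fun q => q.2 == "false")).length with hnf
    by_cases h0 : nt = nf
    · by_cases hz : nt = 0
      · have hfz : nf = 0 := by omega
        simp [hz, hfz]
      · simp [h0, (by omega : 0 < nf)]
        omega
    · by_cases hgt : nt > nf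
      · by_cases hfz : nf = 0
        · simp [hfz, (by omega : 0 < nt)]
          omega
        · simp [h0, hgt, (by omega : 0 < nt), (by omega : 0 < nf)]
      · have hlt : nf > nt := by omega
        by_cases htz : nt = 0
        · simp [htz, (by omega : 0 < nf)]
          omega
        · simp [h0, hgt, hlt, (by omega : 0 < nt), (by omega : 0 < nf)]

-- B's signed-sum loop, characterised by the two counts
lemma pv_sm_fold (vals : List String) (a b : Int) :
    vals.foldl
      (fun (sm : Int × Int) v =>
        if v == "true" then (sm.1 + 1, sm.2 + 1)
        else if v == "false" then (sm.1 - 1, sm.2 + 1)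
        else sm) (a, b)
    = (a + (vals.count "true" : Int) - (vals.count "false" : Int),
       b + (vals.count "true" : Int) + (vals.count "false" : Int)) := by
  induction vals generalizing a b with
  | nil => simp
  | cons v t ih =>
    simp only [List.foldl_cons]
    by_cases h1 : v = "true"
    · rw [if_pos (by simp [h1]), ih, h1]
      simp only [List.count_cons, Prod.mk.injEq]
      constructor <;> simp <;> omega
    · by_cases h2 : v = "false"
      · rw [if_neg (by simp [h1]), if_pos (by simp [h2]), ih, h2]
        simp only [List.count_cons, Prod.mk.injEq]
        constructor <;> simp <;> omega
      · rw [if_neg (by simp [h1]), if_neg (by simp [h2]), ih]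
        simp [h1, h2]

-- B's per-benchmark verdict equals A's branch key
lemma pv_verd_eq (all_verdicts : List (String × List (String × String))) (bench : String) :
    pvBenchVerdict all_verdicts bench = pvKeyA ((PySem.Dict.mk all_verdicts).getD bench []) := by
  unfold pvBenchVerdict pvKeyA
  set sv := (PySem.Dict.mk all_verdicts).getD bench [] with hsv
  rw [pv_sm_fold, mv_fst]
  simp only [pv_count_eq, beq_iff_eq]
  split_ifs <;> first | rfl | omega | simp_all

-- A's loop body in canonical modify-with-key form
lemma pv_bodyA_eq (all_verdicts : List (String × List (String × String)))
    (counts : PySem.Dict String (PySem.Dict String Int)) (p : String × String) :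
    pvBodyA all_verdicts counts p =
      counts.modify p.2 PySem.Dict.empty
        (fun m => m.modify (pvKeyA ((PySem.Dict.mk all_verdicts).getD p.1 [])) 0 (· + 1)) := by
  unfold pvBodyA pvKeyA
  set o := (majority_vote ((PySem.Dict.mk all_verdicts).getD p.1 [])).1 with ho
  by_cases h1 : o == some "true"
  · simp [h1]
  · by_cases h2 : o == some "false"
    · simp [h1, h2]
    · by_cases h3 : o == some "inconsistent"
      · simp [h1, h2, h3]
      · simp [h1, h2, h3]

-- getD through a fold of inserts whose value depends only on the key
lemma pv_getD_fold_insert {ν : Type} (g : String → ν) (cats : List String)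
    (d0 : PySem.Dict String ν) (dflt : ν) (c : String) :
    (cats.foldl (fun d x => d.insert x (g x)) d0).getD c dflt
      = if c ∈ cats then g c else d0.getD c dflt := by
  induction cats generalizing d0 with
  | nil => simp
  | cons a t ih =>
    simp only [List.foldl_cons, ih, PySem.Dict.getD_insert, List.mem_cons]
    by_cases hc : c ∈ t
    · simp [hc]
    · by_cases ha : c = a <;> simp [hc, ha]

-- getD of a category through A's loop: the inner counter fold over matching pairs
lemma pv_A_getD (all_verdicts : List (String × List (String × String)))
    (l : List (String × String)) (d : PySem.Dict String (PySem.Dict String Int)) (c : String) :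
    (l.foldl (pvBodyA all_verdicts) d).getD c PySem.Dict.empty
      = ((l.filter (fun p => p.2 == c)).map
            (fun p => pvKeyA ((PySem.Dict.mk all_verdicts).getD p.1 []))).foldl
          (fun m x => m.modify x 0 (· + 1)) (d.getD c PySem.Dict.empty) := by
  induction l generalizing d with
  | nil => simp
  | cons p t ih =>
    simp only [List.foldl_cons, ih, List.filter_cons]
    rw [pv_bodyA_eq]
    by_cases hc : p.2 = c
    · simp [hc]
    · have : (p.2 == c) = false := by simp [hc]
      rw [this]
      simp only [Bool.false_eq_true, if_false]
      congr 1
      have hcc : ¬ c = p.2 := fun h => hc h.symm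
      rw [PySem.Dict.getD_modify]
      simp [hcc]

-- a Set.update by elements already present is the identity
lemma pv_set_update_of_mem {α : Type} [BEq α] [LawfulBEq α]
    (s : PySem.Set α) (l : List α) (h : ∀ x ∈ l, x ∈ s) : PySem.Set.update s l = s := by
  induction l generalizing s with
  | nil => rfl
  | cons a t ih =>
    have ha : a ∈ s := h a (by simp)
    have : PySem.Set.add s a = s := by
      simp [PySem.Set.add, PySem.Set.contains, ha]
    show PySem.Set.update (PySem.Set.add s a) t = s
    rw [this]
    exact ih s (fun x hx => h x (by simp [hx]))

lemma pv_keyA_mem (sv : List (String × String)) : pvKeyA sv ∈ pvVerdKeys := by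
  unfold pvKeyA pvVerdKeys
  split_ifs <;> simp

-- the constant initial inner dict
def pvK : PySem.Dict String Int :=
  PySem.Dict.ofList [("true", 0), ("false", 0), ("inconsistent", 0), ("unknown", 0)]

-- inner counter fold from pvK, rendered as an items list over the four keys
lemma pv_inner_items (xs : List String) (h : ∀ x ∈ xs, x ∈ pvVerdKeys) :
    (xs.foldl (fun m x => m.modify x 0 (· + 1)) pvK).items
      = pvVerdKeys.map (fun v => (v, (xs.count v : Int))) := by
  have hkeys : (xs.foldl (fun m x => m.modify x 0 (· + 1)) pvK).keys = pvVerdKeys := by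
    have hkk := PySem.Dict.keys_foldl_modify_key xs (fun x => x) 0
      (fun _ _ => (· + 1)) pvK
    simp only [List.map_id'] at hkk
    rw [show (fun (m : PySem.Dict String Int) x => m.modify x 0 (· + 1))
          = (fun (d : PySem.Dict String Int) x => d.modify ((fun y => y) x) 0
              ((fun _ _ => (· + 1)) d x)) from rfl, hkk]
    have hK : pvK.keys = pvVerdKeys := by decide
    rw [hK]
    exact pv_set_update_of_mem _ _ (by simpa using h)
  have hnd : (xs.foldl (fun m x => m.modify x 0 (· + 1)) pvK).keys.Nodup := by
    rw [hkeys]; decide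
  rw [PySem.Dict.items_eq_map_keys _ hnd 0, hkeys]
  apply List.map_congr_left
  intro v hv
  have : (xs.foldl (fun m x => m.modify x 0 (· + 1)) pvK).getD v 0
      = pvK.getD v 0 + (xs.count v : Int) :=
    PySem.Dict.getD_foldl_modify_add_one xs pvK v
  rw [this]
  have hK0 : pvK.getD v 0 = 0 := by
    fin_cases hv <;> decide
  rw [hK0, zero_add]

-- count of a (cat, verdict) pair in the mapped list = count of verdict among matching pairs
lemma pv_pair_count (l : List (String × String)) (kf : String × String → String)
    (c v : String) :
    (l.map (fun p => (p.2, kf p))).count (c, v)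
      = ((l.filter (fun p => p.2 == c)).map kf).count v := by
  induction l with
  | nil => rfl
  | cons p t ih =>
    simp only [List.map_cons, List.count_cons, List.filter_cons]
    by_cases h1 : p.2 = c
    · by_cases h2 : kf p = v
      · simp [h1, h2, ih]
      · simp [h1, h2, ih, Prod.ext_iff]
    · simp [h1, ih, Prod.ext_iff]

-- B's pair counter IS the Counter of the mapped (category, verdict) list
lemma pv_pairCounts_eq (all_verdicts : List (String × List (String × String)))
    (l : List (String × String)) :
    pvPairCounts all_verdicts l
      = PySem.Dict.counter (l.map (fun q => (q.2, pvKeyA ((PySem.Dict.mk all_verdicts).getD q.1 [])))) := by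
  have hf : (fun (q : String × String) => (q.2, pvBenchVerdict all_verdicts q.1))
      = (fun q => (q.2, pvKeyA ((PySem.Dict.mk all_verdicts).getD q.1 []))) :=
    funext fun q => by rw [pv_verd_eq]
  calc pvPairCounts all_verdicts l
      = PySem.Dict.counter (l.map (fun q => (q.2, pvBenchVerdict all_verdicts q.1))) := by
        unfold pvPairCounts
        rw [← PySem.Dict.foldl_insert_getD_add_one_eq_counter, List.foldl_map]
    _ = _ := by rw [hf]

-- getD of a category through B's pass-2 loop
lemma pv_B_getD (l : List ((String × String) × Int))
    (d : PySem.Dict String (PySem.Dict String Int)) (c : String) :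
    (l.foldl pvBodyB d).getD c PySem.Dict.empty
      = (l.filter (fun q => q.1.1 == c)).foldl
          (fun m q => m.modify q.1.2 0 (· + q.2)) (d.getD c PySem.Dict.empty) := by
  induction l generalizing d with
  | nil => simp
  | cons q t ih =>
    simp only [List.foldl_cons, ih, List.filter_cons]
    by_cases hc : q.1.1 = c
    · simp [hc, pvBodyB]
    · have : (q.1.1 == c) = false := by simp [hc]
      rw [this]
      simp only [Bool.false_eq_true, if_false]
      congr 1
      have hcc : ¬ c = q.1.1 := fun h => hc h.symm
      rw [pvBodyB, PySem.Dict.getD_modify]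
      simp [hcc]

-- getD through the pass-2 inner accumulation
lemma pv_fold_add_getD (xs : List ((String × String) × Int))
    (m : PySem.Dict String Int) (v : String) :
    (xs.foldl (fun m q => m.modify q.1.2 0 (· + q.2)) m).getD v 0
      = m.getD v 0 + ((xs.filter (fun q => q.1.2 == v)).map (·.2)).sum := by
  induction xs generalizing m with
  | nil => simp
  | cons q t ih =>
    simp only [List.foldl_cons, ih, List.filter_cons]
    by_cases hv : q.1.2 = v
    · simp [hv]
      ring
    · have : (q.1.2 == v) = false := by simp [hv]
      rw [this]
      simp only [Bool.false_eq_true, if_false]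
      congr 1
      have hvv : ¬ v = q.1.2 := fun h => hv h.symm
      rw [PySem.Dict.getD_modify]
      simp [hvv]

-- pass-2 inner accumulation from pvK, rendered as an items list over the four keys
lemma pv_inner_items_add (xs : List ((String × String) × Int))
    (h : ∀ q ∈ xs, q.1.2 ∈ pvVerdKeys) :
    (xs.foldl (fun m q => m.modify q.1.2 0 (· + q.2)) pvK).items
      = pvVerdKeys.map (fun v => (v, ((xs.filter (fun q => q.1.2 == v)).map (·.2)).sum)) := by
  have hkeys : (xs.foldl (fun m q => m.modify q.1.2 0 (· + q.2)) pvK).keys = pvVerdKeys := by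
    have hkk := PySem.Dict.keys_foldl_modify_key xs (fun q => q.1.2) 0
      (fun _ q => (· + q.2)) pvK
    rw [show (fun (m : PySem.Dict String Int) (q : (String × String) × Int) =>
            m.modify q.1.2 0 (· + q.2))
          = (fun (d : PySem.Dict String Int) q => d.modify ((fun q => q.1.2) q) 0
              ((fun _ q => (· + q.2)) d q)) from rfl, hkk]
    have hK : pvK.keys = pvVerdKeys := by decide
    rw [hK]
    exact pv_set_update_of_mem _ _ (by
      intro x hx
      simp only [List.mem_map] at hx
      obtain ⟨q, hq, rfl⟩ := hx
      exact h q hq)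
  have hnd : (xs.foldl (fun m q => m.modify q.1.2 0 (· + q.2)) pvK).keys.Nodup := by
    rw [hkeys]; decide
  rw [PySem.Dict.items_eq_map_keys _ hnd 0, hkeys]
  apply List.map_congr_left
  intro v hv
  rw [pv_fold_add_getD]
  have hK0 : pvK.getD v 0 = 0 := by
    fin_cases hv <;> decide
  rw [hK0, zero_add]

-- summing the counter items matching (c, v) recovers the plain count
lemma pv_counter_items_sum (L : List (String × String)) (c v : String) :
    (((((PySem.Set.ofList L).map (fun k => (k, (L.count k : Int)))).filter
          (fun q => q.1.1 == c)).filter (fun q => q.1.2 == v)).map (·.2)).sum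
      = (L.count (c, v) : Int) := by
  rw [List.filter_filter, List.filter_map]
  have hpred : ((fun (q : (String × String) × Int) => q.1.2 == v && q.1.1 == c) ∘
        (fun k => (k, (L.count k : Int)))) = (fun k => k == (c, v)) := by
    funext k
    show (k.2 == v && k.1 == c) = (k == (c, v))
    rw [Bool.and_comm]
    rfl
  rw [hpred, List.filter_beq, List.map_map]
  by_cases hm : (c, v) ∈ PySem.Set.ofList L
  · have h1 : (PySem.Set.ofList L).count (c, v) = 1 :=
      List.count_eq_one_of_mem (PySem.Set.nodup_ofList L) hm
    rw [h1]
    simp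
  · have h0 : (PySem.Set.ofList L).count (c, v) = 0 :=
      List.count_eq_zero.mpr hm
    have hL0 : L.count (c, v) = 0 :=
      List.count_eq_zero.mpr (fun hmem => hm ((PySem.Set.mem_ofList L _).mpr hmem))
    rw [h0, hL0]
    simp

-- ===== VERDICT (by name: the statement is the Claim_ definition above) =====
theorem compute_verdict_counts_spec : Claim_equal_compute_verdict_counts := by
  intro av b2c cats _ hpre
  unfold Spec_compute_verdict_counts compute_verdict_counts compute_verdict_counts_alt
  -- outer keys on both sides: Set.ofList cats, Nodup
  have hinit_keys : (pvInitCounts cats).keys = PySem.Set.ofList cats := by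
    unfold pvInitCounts
    rw [PySem.Dict.keys_foldl_insert cats (fun _ _ => PySem.Dict.ofList
      [("true", 0), ("false", 0), ("inconsistent", 0), ("unknown", 0)]) PySem.Dict.empty]
    rfl
  have hinit_nd : (pvInitCounts cats).keys.Nodup := by
    unfold pvInitCounts
    exact PySem.Dict.nodup_keys_foldl_insert cats _ _ (by decide)
  -- A's fold in canonical form
  have hA : b2c.foldl (pvBodyA av) (pvInitCounts cats)
      = b2c.foldl (fun d p => d.modify p.2 PySem.Dict.empty
          (fun m => m.modify (pvKeyA ((PySem.Dict.mk av).getD p.1 [])) 0 (· + 1)))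
          (pvInitCounts cats) :=
    PySem.List.foldl_congr_mem _ _ _ _ (fun d p _ => pv_bodyA_eq av d p)
  have hA_keys : (b2c.foldl (pvBodyA av) (pvInitCounts cats)).keys = PySem.Set.ofList cats := by
    rw [hA]
    rw [PySem.Dict.keys_foldl_modify_key b2c (fun p => p.2) PySem.Dict.empty
      (fun _ p => (fun m => m.modify (pvKeyA ((PySem.Dict.mk av).getD p.1 [])) 0 (· + 1)))
      (pvInitCounts cats), hinit_keys]
    exact pv_set_update_of_mem _ _ (by
      intro x hx
      simp only [List.mem_map] at hx
      obtain ⟨p, hp, rfl⟩ := hx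
      exact (PySem.Set.mem_ofList cats p.2).mpr (hpre p hp))
  have hA_nd : (b2c.foldl (pvBodyA av) (pvInitCounts cats)).keys.Nodup := by
    rw [hA]
    exact PySem.Dict.nodup_keys_foldl_modify_key b2c (fun p => p.2) PySem.Dict.empty
      _ (pvInitCounts cats) hinit_nd
  -- B's fold: the Counter of the mapped (category, verdict) list L
  have hpc : pvPairCounts av b2c
      = PySem.Dict.counter (b2c.map (fun q => (q.2, pvKeyA ((PySem.Dict.mk av).getD q.1 [])))) :=
    pv_pairCounts_eq av b2c
  have hitems : (pvPairCounts av b2c).items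
      = (PySem.Set.ofList (b2c.map (fun q => (q.2, pvKeyA ((PySem.Dict.mk av).getD q.1 []))))).map
          (fun k => (k, ((b2c.map (fun q => (q.2, pvKeyA ((PySem.Dict.mk av).getD q.1 [])))).count k : Int))) := by
    rw [hpc, PySem.Dict.items_counter]
  -- every counter key's category is in cats and its verdict in pvVerdKeys
  have hkfact : ∀ q ∈ (pvPairCounts av b2c).items, q.1.1 ∈ cats ∧ q.1.2 ∈ pvVerdKeys := by
    intro q hq
    rw [hitems] at hq
    simp only [List.mem_map] at hq
    obtain ⟨k, hk, rfl⟩ := hq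
    have hkL := (PySem.Set.mem_ofList _ k).mp hk
    simp only [List.mem_map] at hkL
    obtain ⟨p, hp, rfl⟩ := hkL
    exact ⟨hpre p hp, pv_keyA_mem _⟩
  have hBfun : pvBodyB = (fun (d : PySem.Dict String (PySem.Dict String Int))
      (q : (String × String) × Int) =>
        d.modify ((fun (q : (String × String) × Int) => q.1.1) q) PySem.Dict.empty
          ((fun (_ : PySem.Dict String (PySem.Dict String Int))
              (q : (String × String) × Int) =>
            (fun (m : PySem.Dict String Int) => m.modify q.1.2 0 (· + q.2))) d q)) := rfl
  have hB_keys : ((pvPairCounts av b2c).items.foldl pvBodyB (pvInitCounts cats)).keys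
      = PySem.Set.ofList cats := by
    rw [hBfun, PySem.Dict.keys_foldl_modify_key ((pvPairCounts av b2c).items)
        (fun (q : (String × String) × Int) => q.1.1) PySem.Dict.empty
        (fun _ q => (fun m => m.modify q.1.2 0 (· + q.2))) (pvInitCounts cats), hinit_keys]
    exact pv_set_update_of_mem _ _ (by
      intro x hx
      simp only [List.mem_map] at hx
      obtain ⟨q, hq, rfl⟩ := hx
      exact (PySem.Set.mem_ofList cats q.1.1).mpr (hkfact q hq).1)
  have hB_nd : ((pvPairCounts av b2c).items.foldl pvBodyB (pvInitCounts cats)).keys.Nodup := by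
    rw [hBfun]
    exact PySem.Dict.nodup_keys_foldl_modify_key _
      (fun (q : (String × String) × Int) => q.1.1) PySem.Dict.empty
      _ (pvInitCounts cats) hinit_nd
  rw [PySem.Dict.items_eq_map_keys _ hA_nd PySem.Dict.empty, hA_keys,
      PySem.Dict.items_eq_map_keys _ hB_nd PySem.Dict.empty, hB_keys,
      List.map_map, List.map_map]
  apply List.map_congr_left
  intro c hc
  have hc' : c ∈ cats := (PySem.Set.mem_ofList cats c).mp hc
  simp only [Function.comp_apply]
  refine Prod.ext rfl ?_
  have hinit_getD : (pvInitCounts cats).getD c PySem.Dict.empty = pvK := by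
    unfold pvInitCounts
    have h := pv_getD_fold_insert (fun _ => pvK) cats PySem.Dict.empty PySem.Dict.empty c
    simp only [hc', if_true] at h
    exact h
  show ((b2c.foldl (pvBodyA av) (pvInitCounts cats)).getD c PySem.Dict.empty).items
      = (((pvPairCounts av b2c).items.foldl pvBodyB (pvInitCounts cats)).getD c PySem.Dict.empty).items
  rw [pv_A_getD, pv_B_getD, hinit_getD]
  rw [pv_inner_items _ (by
    intro x hx
    simp only [List.mem_map] at hx
    obtain ⟨p, _, rfl⟩ := hx
    exact pv_keyA_mem _)]
  rw [pv_inner_items_add _ (by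
    intro q hq
    exact (hkfact q (List.mem_of_mem_filter hq)).2)]
  apply List.map_congr_left
  intro v _
  refine Prod.ext rfl ?_
  rw [hitems, pv_counter_items_sum, ← pv_pair_count]
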